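-- pv_equiv track=rewrite | github.com/MatDawit/UMBC-CMSC201 | Homework/hw6/ab_verify.py | ab_verify
-- ===== SOURCE A (Python) =====
-- def ab_verify(string, num):
--    """
--     A function to find if a word has a greater about of a's then b's
--     :param string: a string of a's and b's
--     :param num: number of a's and b's
--     :return: True or False
--     """
--    if len(string) == 0:
--       return num > -1
--    elif num < 0:
--       return False
--    elif string[0] == 'a':
--       num += 1
--    elif string[0] == 'b':
--       num -= 1
--
--    return ab_verify(string[1:], num)
-- ===== SOURCE B (Python) =====
-- def ab_verify(string, num):
--     sums = [num]
--     run = num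
--     for c in string:
--         run += 1 if c == 'a' else -1 if c == 'b' else 0
--         sums.append(run)
--     return all(v >= 0 for v in sums)
-- ===== Notes on version B (the rewrite author's own statement) =====
-- stated objective: faster
-- what changed: Replaces the character-by-character early-returning recursion (which slices the string each call) with a single pass that builds the table of running balances and then checks all of them are non-negative.
import Mathlib
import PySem

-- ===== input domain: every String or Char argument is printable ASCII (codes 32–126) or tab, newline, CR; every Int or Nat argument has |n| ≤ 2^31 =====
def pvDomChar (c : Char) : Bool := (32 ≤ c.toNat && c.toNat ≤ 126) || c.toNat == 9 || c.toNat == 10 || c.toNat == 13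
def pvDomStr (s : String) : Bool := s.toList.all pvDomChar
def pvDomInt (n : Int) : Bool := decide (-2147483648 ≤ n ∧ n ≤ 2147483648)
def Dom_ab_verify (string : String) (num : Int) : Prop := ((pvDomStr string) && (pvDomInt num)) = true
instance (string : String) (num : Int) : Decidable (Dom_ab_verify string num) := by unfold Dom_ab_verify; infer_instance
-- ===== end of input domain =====

-- B builds the table of running balances in one pass and checks them all, instead of A's early-returning recursion (alternative decomposition; return value proved equal).


-- ===== PORT A =====
-- literal transliteration of A's recursion (string[0] test, string[1:] recursion)
def abVerifyGoA : List Char → Int → Bool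
  | [], num => decide (num > -1)
  | c :: rest, num =>
      if num < 0 then false
      else if c = 'a' then abVerifyGoA rest (num + 1)
      else if c = 'b' then abVerifyGoA rest (num - 1)
      else abVerifyGoA rest num

def ab_verify (string : String) (num : Int) : Bool := abVerifyGoA string.toList num

-- ===== PORT B =====
-- per-character contribution: 1 if c=='a' else -1 if c=='b' else 0
def abDelta (c : Char) : Int := if c = 'a' then 1 else if c = 'b' then -1 else 0

-- the loop of Source B: state (sums, run), appending each new running balance
def ab_verify_alt (string : String) (num : Int) : Bool :=
  let st := string.toList.foldl
    (fun (p : List Int × Int) c =>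
      let run := p.2 + abDelta c
      (p.1 ++ [run], run)) ([num], num)
  st.1.all (fun v => decide (0 ≤ v))

-- ===== PRECONDITION & SPEC =====
def Spec_ab_verify (string : String) (num : Int) (out : Bool) : Prop := out = ab_verify_alt string num
instance (string : String) (num : Int) (out : Bool) : Decidable (Spec_ab_verify string num out) := by unfold Spec_ab_verify; infer_instance

-- ===== CLAIM (what is proved, stated in full; the proofs are below) =====
def Claim_equal_ab_verify : Prop := ∀ (string : String) (num : Int), Dom_ab_verify string num → Spec_ab_verify string num (ab_verify string num)

-- ===== LEMMAS AND PROOFS =====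

-- the tail of the running-balance table, as a direct recursion
def abTail : List Char → Int → List Int
  | [], _ => []
  | c :: cs, run => (run + abDelta c) :: abTail cs (run + abDelta c)

-- the final running balance
def abRun : List Char → Int → Int
  | [], run => run
  | c :: cs, run => abRun cs (run + abDelta c)

lemma ab_fold_eq (cs : List Char) : ∀ (sums : List Int) (run : Int),
    cs.foldl (fun (p : List Int × Int) c =>
      let r := p.2 + abDelta c
      (p.1 ++ [r], r)) (sums, run)
      = (sums ++ abTail cs run, abRun cs run) := by
  induction cs with
  | nil => intro sums run; simp [abTail, abRun]
  | cons c cs ih =>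
      intro sums run
      simp only [List.foldl_cons, abTail, abRun]
      rw [ih]
      simp

lemma abGoA_eq_all (cs : List Char) : ∀ num : Int,
    abVerifyGoA cs num = ((num :: abTail cs num).all (fun v => decide (0 ≤ v))) := by
  induction cs with
  | nil =>
      intro num
      simp only [abVerifyGoA, abTail, List.all_cons, List.all_nil, Bool.and_true]
      by_cases h : (0:Int) ≤ num
      · simp [h]; omega
      · simp [h]; omega
  | cons c cs ih =>
      intro num
      simp only [abVerifyGoA, abTail, List.all_cons]
      by_cases h : num < 0
      · have h0 : ¬ (0:Int) ≤ num := by omega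
        simp [h, h0]
      · have h0 : (0:Int) ≤ num := by omega
        by_cases ha : c = 'a'
        · simp [h, ha, h0, ih, abDelta, List.all_cons]
        · by_cases hb : c = 'b'
          · simp [h, hb, h0, ih, abDelta, List.all_cons, sub_eq_add_neg]
          · simp [h, ha, hb, h0, ih, abDelta, List.all_cons]

-- ===== VERDICT (by name: the statement is the Claim_ definition above) =====
theorem ab_verify_spec : Claim_equal_ab_verify := by
  intro string num _
  unfold Spec_ab_verify ab_verify ab_verify_alt
  rw [ab_fold_eq]
  simpa using abGoA_eq_all string.toList num
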